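-- pv_equiv track=rewrite | github.com/wowchois/study | Algorithm/Programmers/level3_게임아이템.py | solution
-- ===== SOURCE A (Python) =====
-- from collections import deque
-- from heapq import heappush,heappop
--
-- def solution(healths, items):
--     answer = []
--     healths.sort()
--     item = [[x[0],x[1],i] for i,x in enumerate(items)]
--     item.sort(key=lambda x:x[1])
--     que = deque(item)
--     heap = [] #사용한아이템
--
--     for h in healths:
--         while que:
--             attack,use,idx = que[0]
--             if h-use < 100:
--                 break
--             else:
--                 que.popleft()
--                 heappush(heap,[-attack,idx+1])
--         if heap:
--             _, i = heappop(heap)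
--             answer.append(i)
--
--     answer.sort()
--     return answer
-- ===== SOURCE B (Python) =====
-- # Simpler greedy: use-sorted index pointer + linear max scan instead of deque + heap.
-- # Like A, this sorts `healths` in place (same observable mutation).
-- def solution(healths, items):
--     healths.sort()
--     order = sorted(range(len(items)), key=lambda i: items[i][1])
--     available = []  # (attack, original_index) of usable, unused items
--     ptr = 0
--     answer = []
--     for h in healths:
--         while ptr < len(order) and items[order[ptr]][1] <= h - 100:
--             i = order[ptr]
--             available.append((items[i][0], i))
--             ptr += 1
--         if available:
--             best = max(available, key=lambda t: (t[0], -t[1]))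
--             available.remove(best)
--             answer.append(best[1] + 1)
--     answer.sort()
--     return answer
-- ===== Notes on version B (the rewrite author's own statement) =====
-- stated objective: simpler
-- what changed: Replaces the deque-plus-max-heap machinery with a plain pointer into a use-sorted index list and a linear max scan (max with a tuple key) over the currently usable items, keeping the same greedy order.
import Mathlib
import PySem

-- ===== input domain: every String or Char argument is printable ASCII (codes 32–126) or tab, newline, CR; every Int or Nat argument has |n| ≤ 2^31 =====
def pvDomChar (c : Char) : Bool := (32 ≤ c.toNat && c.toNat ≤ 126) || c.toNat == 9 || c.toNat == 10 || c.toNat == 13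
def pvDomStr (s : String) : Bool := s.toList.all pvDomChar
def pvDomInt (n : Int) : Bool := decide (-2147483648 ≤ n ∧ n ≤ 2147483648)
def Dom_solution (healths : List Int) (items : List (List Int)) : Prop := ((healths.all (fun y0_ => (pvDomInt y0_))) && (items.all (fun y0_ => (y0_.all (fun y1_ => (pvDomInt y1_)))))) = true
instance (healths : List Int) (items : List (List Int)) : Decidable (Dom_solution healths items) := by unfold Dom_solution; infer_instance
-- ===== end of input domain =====

-- B replaces A's deque + max-heap with a pointer into a use-sorted index list and a linear
-- max scan; both programs sort `healths` in place (same side effect), equivalence is about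
-- the return value.

-- ===== PORT A =====
-- heapq has no PySem primitive; the heap is ported as the bag of its entries: heappush
-- appends, heappop removes the lexicographically smallest entry (first occurrence).
-- Exact here because heappop returns the minimum of the heap and comparison of the
-- [-attack, idx+1] entry lists is the lexicographic order on the pairs.
def heapPush (heap : List (Int × Int)) (e : Int × Int) : List (Int × Int) := heap ++ [e]

def heapPop? (heap : List (Int × Int)) : Option ((Int × Int) × List (Int × Int)) :=
  match PySem.List.min2? heap (fun p => p.1) (fun p => p.2) with
  | none => none
  | some m => (PySem.List.remove? heap m).map (fun rest => (m, rest))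

-- the inner `while que:` loop of A
def fillA (h : Int) : List (Int × Int × Int) → List (Int × Int) → List (Int × Int × Int) × List (Int × Int)
  | [], heap => ([], heap)
  | (attack, use, idx) :: rest, heap =>
    if h - use < 100 then ((attack, use, idx) :: rest, heap)
    else fillA h rest (heapPush heap (-attack, idx + 1))

-- one iteration of A's `for h in healths:` loop; state = (que, heap, answer)
def stepA (st : List (Int × Int × Int) × List (Int × Int) × List Int) (h : Int) :
    List (Int × Int × Int) × List (Int × Int) × List Int :=
  let q := fillA h st.1 st.2.1
  match heapPop? q.2 with
  | none => (q.1, q.2, st.2.2)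
  | some (m, heap') => (q.1, heap', st.2.2 ++ [m.2])

def solution (healths : List Int) (items : List (List Int)) : List Int :=
  let hs := PySem.List.sorted healths (fun x => x) false
  let item := (PySem.List.enumerate items).map
    (fun p => (PySem.List.pyGetD p.2 0 0, PySem.List.pyGetD p.2 1 0, p.1))
  let itemS := PySem.List.sorted item (fun t => t.2.1) false
  let r := hs.foldl stepA (itemS, [], [])
  PySem.List.sorted r.2.2 (fun x => x) false

-- ===== PORT B =====
-- the inner `while ptr < len(order) and ...:` loop of B
def fillB (items : List (List Int)) (order : List Int) (h : Int) (ptr : Nat)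
    (avail : List (Int × Int)) : Nat × List (Int × Int) :=
  if hlt : ptr < order.length then
    if PySem.List.pyGetD (PySem.List.pyGetD items order[ptr] []) 1 0 ≤ h - 100 then
      fillB items order h (ptr + 1)
        (avail ++ [(PySem.List.pyGetD (PySem.List.pyGetD items order[ptr] []) 0 0, order[ptr])])
    else (ptr, avail)
  else (ptr, avail)
termination_by order.length - ptr
decreasing_by omega

-- one iteration of B's `for h in healths:` loop; state = (ptr, available, answer).
-- `available.remove(best)` never misses (best is a member); `.getD` is its total form.
def stepB (items : List (List Int)) (order : List Int)
    (st : Nat × List (Int × Int) × List Int) (h : Int) :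
    Nat × List (Int × Int) × List Int :=
  let q := fillB items order h st.1 st.2.1
  match PySem.List.max2? q.2 (fun t => t.1) (fun t => -t.2) with
  | none => (q.1, q.2, st.2.2)
  | some b => (q.1, (PySem.List.remove? q.2 b).getD q.2, st.2.2 ++ [b.2 + 1])

def solution_alt (healths : List Int) (items : List (List Int)) : List Int :=
  let order := PySem.List.sorted (PySem.List.pyRange 0 (PySem.List.len items) 1)
    (fun i => PySem.List.pyGetD (PySem.List.pyGetD items i []) 1 0) false
  let hs := PySem.List.sorted healths (fun x => x) false
  let r := hs.foldl (stepB items order) (0, [], [])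
  PySem.List.sorted r.2.2 (fun x => x) false

-- ===== PRECONDITION & SPEC =====
-- Pre_ excludes exactly the inputs where Python A raises: a row with fewer than two
-- entries makes `x[1]` (A) — and B's key lookup — raise IndexError.
def Pre_solution (healths : List Int) (items : List (List Int)) : Prop :=
  ∀ r ∈ items, 2 ≤ r.length
instance (healths : List Int) (items : List (List Int)) : Decidable (Pre_solution healths items) := by
  unfold Pre_solution; infer_instance

def pvWitness_solution : List Int × List (List Int) := ([130, 100], [[3, 0], [5, 30]])

def Spec_solution (healths : List Int) (items : List (List Int)) (out : List Int) : Prop := out = solution_alt healths items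
instance (healths : List Int) (items : List (List Int)) (out : List Int) : Decidable (Spec_solution healths items out) := by unfold Spec_solution; infer_instance

-- ===== CLAIM (what is proved, stated in full; the proofs are below) =====
def Claim_equal_solution : Prop := ∀ (healths : List Int) (items : List (List Int)), Dom_solution healths items → Pre_solution healths items → Spec_solution healths items (solution healths items)

-- ===== LEMMAS AND PROOFS =====

-- heap entry [-attack, idx+1] built from B's (attack, original_index) pair
def pvF (p : Int × Int) : Int × Int := (-p.1, p.2 + 1)

-- the (attack, use, index) triple A keeps for original index i
def pvG (items : List (List Int)) (i : Int) : Int × Int × Int :=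
  (PySem.List.pyGetD (PySem.List.pyGetD items i []) 0 0,
   PySem.List.pyGetD (PySem.List.pyGetD items i []) 1 0, i)

theorem pvF_inj {p q : Int × Int} (h : pvF p = pvF q) : p = q := by
  cases p; cases q
  simp only [pvF, Prod.mk.injEq] at h ⊢
  omega

theorem insertBy_map {α β : Type} (gg : α → β) (bef : α → α → Bool) (bef' : β → β → Bool)
    (hb : ∀ a b, bef' (gg a) (gg b) = bef a b) (x : α) (l : List α) :
    PySem.List.insertBy bef' (gg x) (l.map gg) = (PySem.List.insertBy bef x l).map gg := by
  induction l with
  | nil => simp [PySem.List.insertBy]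
  | cons y ys ih =>
    simp only [List.map_cons, PySem.List.insertBy, hb]
    split <;> simp [ih]

theorem sorted_map {α β κ : Type} [LT κ] [DecidableLT κ] (gg : α → β) (k : β → κ) (l : List α) :
    PySem.List.sorted (l.map gg) k false = (PySem.List.sorted l (fun a => k (gg a)) false).map gg := by
  simp only [PySem.List.sorted, if_neg (by decide : ¬ (false = true))]
  suffices hgen : ∀ (acc : List α),
      (l.map gg).foldl (fun acc x => PySem.List.insertBy (fun a b => decide (k a < k b)) x acc) (acc.map gg)
        = (l.foldl (fun acc x => PySem.List.insertBy (fun a b => decide (k (gg a) < k (gg b))) x acc) acc).map gg by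
    simpa using hgen []
  induction l with
  | nil => intro acc; simp
  | cons y ys ih =>
    intro acc
    simp only [List.map_cons, List.foldl_cons]
    rw [insertBy_map gg _ _ (fun a b => rfl) y acc, ih]

theorem min2_map_max2 (l : List (Int × Int)) :
    PySem.List.min2? (l.map pvF) (fun p => p.1) (fun p => p.2)
      = (PySem.List.max2? l (fun t => t.1) (fun t => -t.2)).map pvF := by
  induction l using List.reverseRecOn with
  | nil => rfl
  | append_singleton t x ih =>
    simp only [PySem.List.min2?, PySem.List.max2?, List.map_append, List.map_cons,
      List.map_nil, List.foldl_append, List.foldl_cons, List.foldl_nil] at ih ⊢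
    rw [ih]
    split
    · next Y hY =>
      rw [Option.map_eq_none_iff] at hY
      rw [hY]
      rfl
    · next Y m hY =>
      rcases Option.map_eq_some_iff.mp hY with ⟨m', hm', rfl⟩
      rw [hm']
      have hcond : (decide ((pvF x).1 < (pvF m').1) || (!decide ((pvF m').1 < (pvF x).1) && decide ((pvF x).2 < (pvF m').2)))
          = (decide (m'.1 < x.1) || (!decide (x.1 < m'.1) && decide (-m'.2 < -x.2))) := by
        rcases x with ⟨x1, x2⟩; rcases m' with ⟨a1, a2⟩
        simp only [pvF]
        rw [decide_eq_decide.mpr (show (-x1 < -a1) ↔ (a1 < x1) by omega),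
            decide_eq_decide.mpr (show (-a1 < -x1) ↔ (x1 < a1) by omega),
            decide_eq_decide.mpr (show (x2 + 1 < a2 + 1) ↔ (-a2 < -x2) by omega)]
      rw [hcond]
      split
      · rename_i hc
        simp
        simp at hc
        rw [if_pos (by omega)]
        exact ⟨x.1, x.2, rfl, rfl⟩
      · rename_i hc
        simp
        simp at hc
        rw [if_neg (by omega)]
        exact ⟨m'.1, m'.2, rfl, rfl⟩

theorem remove?_map (l : List (Int × Int)) (x : Int × Int) :
    PySem.List.remove? (l.map pvF) (pvF x) = (PySem.List.remove? l x).map (List.map pvF) := by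
  induction l with
  | nil => simp [PySem.List.remove?]
  | cons y t ih =>
    by_cases hyx : y = x
    · subst hyx; simp [PySem.List.remove?_cons_self]
    · have hne : pvF y ≠ pvF x := fun hc => hyx (pvF_inj hc)
      rw [List.map_cons, PySem.List.remove?_cons_of_ne (t.map pvF) hne,
        PySem.List.remove?_cons_of_ne t hyx, ih]
      cases PySem.List.remove? t x <;> rfl

theorem max2?_mem {α κ₁ κ₂ : Type} [LT κ₁] [DecidableLT κ₁] [LT κ₂] [DecidableLT κ₂]
    (l : List α) (k1 : α → κ₁) (k2 : α → κ₂) {m : α}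
    (h : PySem.List.max2? l k1 k2 = some m) : m ∈ l := by
  induction l using List.reverseRecOn with
  | nil => simp [PySem.List.max2?] at h
  | append_singleton t x ih =>
    simp only [PySem.List.max2?, List.foldl_append, List.foldl_cons, List.foldl_nil] at h ih
    split at h
    · next heq => cases h; simp
    · next a heq =>
      split at h
      · cases h; simp
      · cases h; exact List.mem_append_left _ (ih heq)

theorem fill_corr (items : List (List Int)) (order : List Int) (h : Int)
    (ptr : Nat) (avail : List (Int × Int)) :
    fillA h ((order.map (pvG items)).drop ptr) (avail.map pvF)
      = ((order.map (pvG items)).drop (fillB items order h ptr avail).1,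
         (fillB items order h ptr avail).2.map pvF) := by
  induction ptr, avail using fillB.induct items order h with
  | case1 ptr avail hlt hcond ih =>
    have hdrop : (order.map (pvG items)).drop ptr
        = pvG items order[ptr] :: (order.map (pvG items)).drop (ptr + 1) := by
      rw [List.drop_eq_getElem_cons (by simpa using hlt)]
      simp
    rw [fillB]
    simp only [dif_pos hlt, if_pos hcond]
    rw [hdrop]
    simp only [pvG, fillA]
    rw [if_neg (by omega)]
    have hpush : heapPush (avail.map pvF)
        (-(PySem.List.pyGetD (PySem.List.pyGetD items order[ptr] []) 0 0), order[ptr] + 1)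
        = (avail ++ [(PySem.List.pyGetD (PySem.List.pyGetD items order[ptr] []) 0 0, order[ptr])]).map pvF := by
      simp [heapPush, pvF]
    rw [hpush]
    simpa only [pvG] using ih
  | case2 ptr avail hlt hcond =>
    have hdrop : (order.map (pvG items)).drop ptr
        = pvG items order[ptr] :: (order.map (pvG items)).drop (ptr + 1) := by
      rw [List.drop_eq_getElem_cons (by simpa using hlt)]
      simp
    rw [fillB]
    simp only [dif_pos hlt, if_neg hcond]
    rw [hdrop]
    simp only [pvG, fillA]
    rw [if_pos (by omega)]
  | case3 ptr avail hlt =>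
    rw [fillB]
    simp only [dif_neg hlt]
    rw [List.drop_eq_nil_of_le (by simp; omega)]
    rfl

theorem loop_corr (items : List (List Int)) (order : List Int) (hs : List Int) :
    ∀ (ptr : Nat) (avail : List (Int × Int)) (ans : List Int),
    hs.foldl stepA ((order.map (pvG items)).drop ptr, avail.map pvF, ans)
      = ((order.map (pvG items)).drop (hs.foldl (stepB items order) (ptr, avail, ans)).1,
         (hs.foldl (stepB items order) (ptr, avail, ans)).2.1.map pvF,
         (hs.foldl (stepB items order) (ptr, avail, ans)).2.2) := by
  induction hs with
  | nil => intro ptr avail ans; rfl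
  | cons h t ih =>
    intro ptr avail ans
    simp only [List.foldl_cons]
    have hstep : stepA ((order.map (pvG items)).drop ptr, avail.map pvF, ans) h
        = ((order.map (pvG items)).drop (stepB items order (ptr, avail, ans) h).1,
           (stepB items order (ptr, avail, ans) h).2.1.map pvF,
           (stepB items order (ptr, avail, ans) h).2.2) := by
      simp only [stepA, stepB, fill_corr items order h ptr avail]
      simp only [heapPop?, min2_map_max2]
      cases hb : PySem.List.max2? (fillB items order h ptr avail).2 (fun t => t.1) (fun t => -t.2) with
      | none => rfl
      | some b =>
        have hmem := max2?_mem _ _ _ hb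
        have hrem := PySem.List.remove?_eq_some_erase _ _ hmem
        simp only [Option.map_some, remove?_map, hrem, Option.getD_some]
        rfl
    rw [hstep, ih]

theorem itemS_eq (items : List (List Int)) :
    PySem.List.sorted
      ((PySem.List.enumerate items).map
        (fun p => (PySem.List.pyGetD p.2 0 0, PySem.List.pyGetD p.2 1 0, p.1)))
      (fun t => t.2.1) false
    = (PySem.List.sorted (PySem.List.pyRange 0 (PySem.List.len items) 1)
        (fun i => PySem.List.pyGetD (PySem.List.pyGetD items i []) 1 0) false).map (pvG items) := by
  have henum : (PySem.List.enumerate items).map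
      (fun p => (PySem.List.pyGetD p.2 0 0, PySem.List.pyGetD p.2 1 0, p.1))
      = (PySem.List.pyRange 0 (PySem.List.len items) 1).map (pvG items) := by
    rw [PySem.List.enumerate_eq_map_pyRange items ([] : List Int), List.map_map]
    rfl
  rw [henum, sorted_map (pvG items) (fun t => t.2.1)]
  rfl

-- ===== VERDICT (by name: the statement is the Claim_ definition above) =====
theorem solution_spec : Claim_equal_solution := by
  intro healths items _ _
  show solution healths items = solution_alt healths items
  simp only [solution, solution_alt, itemS_eq]
  have := loop_corr items
    (PySem.List.sorted (PySem.List.pyRange 0 (PySem.List.len items) 1)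
      (fun i => PySem.List.pyGetD (PySem.List.pyGetD items i []) 1 0) false)
    (PySem.List.sorted healths (fun x => x) false) 0 [] []
  simp only [List.drop_zero, List.map_nil] at this
  rw [this]
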